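-- pv_equiv track=rewrite | github.com/yoshkur/puroguramanowo_kitaeru_sugaku_pazuru | q46_3.py | count_swap
-- ===== SOURCE A (Python) =====
-- def count_swap(n: int):
--     if n == 1:
--         return 0
--     result = n - 1
--     for i in range(1, n):
--         result *= i
--     result += n * count_swap(n=n - 1)
--     return result
-- ===== SOURCE B (Python) =====
-- def count_swap(n: int):
--     res = 0
--     fact = 1
--     for k in range(2, n + 1):
--         fact *= k - 1
--         res = k * res + (k - 1) * fact
--     return res
-- ===== Notes on version B (the rewrite author's own statement) =====
-- stated objective: faster
-- what changed: Replaced the recursion with an inner factorial loop (O(n^2) multiplications) by a single bottom-up pass maintaining a running factorial and the recurrence accumulator (O(n) multiplications).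
import Mathlib
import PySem

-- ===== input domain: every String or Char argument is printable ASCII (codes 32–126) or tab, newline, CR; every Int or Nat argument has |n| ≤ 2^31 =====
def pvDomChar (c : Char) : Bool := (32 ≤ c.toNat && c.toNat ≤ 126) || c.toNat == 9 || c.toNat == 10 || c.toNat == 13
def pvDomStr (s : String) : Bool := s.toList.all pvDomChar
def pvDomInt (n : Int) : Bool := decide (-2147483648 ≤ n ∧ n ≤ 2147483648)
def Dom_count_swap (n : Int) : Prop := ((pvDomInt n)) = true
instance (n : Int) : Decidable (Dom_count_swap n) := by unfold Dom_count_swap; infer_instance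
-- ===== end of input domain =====

-- B replaces A's recursion-with-inner-factorial-loop (O(n^2) multiplications) by one
-- bottom-up pass keeping a running factorial and the recurrence accumulator (O(n)).

-- ===== PORT A =====
-- literal port of A; the 'n ≤ 0' guard only makes the recursion total: Python's A
-- recurses forever there (RecursionError), which Pre_count_swap excludes.
def count_swap (n : Int) : Int :=
  if n = 1 then 0
  else if n ≤ 0 then 0
  else
    (PySem.List.pyRange 1 n 1).foldl (fun r i => r * i) (n - 1) + n * count_swap (n - 1)
termination_by n.toNat
decreasing_by omega

-- ===== PORT B =====
def count_swap_alt (n : Int) : Int :=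
  ((PySem.List.pyRange 2 (n + 1) 1).foldl
    (fun (p : Int × Int) k => (p.1 * (k - 1), k * p.2 + (k - 1) * (p.1 * (k - 1))))
    (1, 0)).2

-- ===== PRECONDITION & SPEC =====
-- Python's A never terminates (RecursionError) for n ≤ 0: the recursion n ↦ n-1 skips the base case n = 1.
def Pre_count_swap (n : Int) : Prop := 1 ≤ n
instance (n : Int) : Decidable (Pre_count_swap n) := by unfold Pre_count_swap; infer_instance
def pvWitness_count_swap : Int := 3

def Spec_count_swap (n : Int) (out : Int) : Prop := out = count_swap_alt n
instance (n : Int) (out : Int) : Decidable (Spec_count_swap n out) := by unfold Spec_count_swap; infer_instance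

-- ===== CLAIM (what is proved, stated in full; the proofs are below) =====
def Claim_equal_count_swap : Prop := ∀ (n : Int), Dom_count_swap n → Pre_count_swap n → Spec_count_swap n (count_swap n)

-- ===== LEMMAS AND PROOFS =====

theorem foldl_mul_init (l : List Int) (a : Int) :
    l.foldl (fun r i => r * i) a = a * l.foldl (fun r i => r * i) 1 := by
  induction l generalizing a with
  | nil => simp
  | cons x xs ih =>
      simp only [List.foldl_cons]
      rw [ih (a * x), ih (1 * x)]
      ring

theorem count_swap_state (n : Int) (h : 1 ≤ n) :
    ((PySem.List.pyRange 2 (n + 1) 1).foldl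
        (fun (p : Int × Int) k => (p.1 * (k - 1), k * p.2 + (k - 1) * (p.1 * (k - 1))))
        (1, 0)).1 = (PySem.List.pyRange 1 n 1).foldl (fun r i => r * i) 1 ∧
    ((PySem.List.pyRange 2 (n + 1) 1).foldl
        (fun (p : Int × Int) k => (p.1 * (k - 1), k * p.2 + (k - 1) * (p.1 * (k - 1))))
        (1, 0)).2 = count_swap n := by
  induction n, h using Int.le_induction with
  | base =>
      rw [PySem.List.pyRange_one_eq_nil (by norm_num : (1:Int) + 1 ≤ 2),
          PySem.List.pyRange_one_eq_nil (le_refl (1:Int))]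
      simp [count_swap]
  | succ n hn ih =>
      rw [show n + 1 + 1 = (n + 1) + 1 by ring,
          PySem.List.pyRange_one_succ_right (by omega : (2:Int) ≤ n + 1),
          PySem.List.pyRange_one_succ_right (by omega : (1:Int) ≤ n)]
      simp only [List.foldl_append, List.foldl_cons, List.foldl_nil]
      obtain ⟨ih1, ih2⟩ := ih
      rw [count_swap]
      rw [if_neg (by omega : ¬ n + 1 = 1), if_neg (by omega : ¬ n + 1 ≤ 0)]
      rw [PySem.List.pyRange_one_succ_right (by omega : (1:Int) ≤ n)]
      simp only [List.foldl_append, List.foldl_cons, List.foldl_nil]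
      rw [foldl_mul_init _ (n + 1 - 1)]
      constructor
      · rw [ih1]; ring
      · rw [ih1, ih2]; ring

-- ===== VERDICT (by name: the statement is the Claim_ definition above) =====
theorem count_swap_spec : Claim_equal_count_swap := by
  intro n _ hpre
  unfold Spec_count_swap count_swap_alt
  exact ((count_swap_state n hpre).2).symm
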